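-- pv_equiv track=rewrite | github.com/alienet1109/RolePersonality | evaluate.py | trim_text_to_n_words
-- ===== SOURCE A (Python) =====
-- def trim_text_to_n_words(text,n=5):
--     lis = []
--     num_words = 0
--     sentences = text.split(".")
--     for sentence in sentences:
--         temp_lis = sentence.split(" ")
--         if num_words + len(temp_lis) < n:
--             lis += temp_lis + ['.']
--             num_words += len(temp_lis)
--         else:
--             break
--     return " ".join(lis)
-- ===== SOURCE B (Python) =====
-- def trim_text_to_n_words(text, n=5):
--     # precompute per-sentence word counts, cumulate, cut off at n, then join
--     sentences = text.split(".")
--     cum = []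
--     total = 0
--     for s in sentences:
--         total += len(s.split(" "))
--         cum.append(total)
--     k = sum(1 for t in cum if t < n)
--     kept = sentences[:k]
--     return " . ".join(kept) + " ." if kept else ""
-- ===== Notes on version B (the rewrite author's own statement) =====
-- stated objective: alternative
-- what changed: Replaces A's single accumulate-word-tokens-then-break loop with a precompute pipeline: per-sentence word counts, cumulative sums, a count-based cutoff k, slice the kept sentences, then rebuild the output by joining the kept raw sentence strings with a period separator and a trailing period.
import Mathlib
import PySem

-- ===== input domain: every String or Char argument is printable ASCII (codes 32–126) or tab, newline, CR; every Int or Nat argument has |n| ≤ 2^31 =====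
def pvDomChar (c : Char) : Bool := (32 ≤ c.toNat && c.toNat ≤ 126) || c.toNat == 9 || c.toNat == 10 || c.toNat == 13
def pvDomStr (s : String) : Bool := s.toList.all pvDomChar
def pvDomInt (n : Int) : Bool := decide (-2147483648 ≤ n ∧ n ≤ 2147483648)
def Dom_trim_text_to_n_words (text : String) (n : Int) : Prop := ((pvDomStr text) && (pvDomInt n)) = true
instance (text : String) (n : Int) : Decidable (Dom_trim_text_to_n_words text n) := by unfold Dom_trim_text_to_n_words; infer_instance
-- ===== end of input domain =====

-- B recomputes the same trimmed text by a counts/cumulative-sums/cutoff/join pipeline instead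
-- of A's accumulate-word-tokens-and-break loop; alternative decomposition, same cost.

-- ===== PORT A =====
-- A's for-loop with break, state (lis, num_words), sentence by sentence.
def trimALoop (n : Int) : List (List Char) → List (List Char) → Int → List (List Char)
  | [], lis, _num => lis
  | sentence :: rest, lis, num =>
      let temp_lis := PySem.Chars.splitOn sentence [' ']
      if num + (temp_lis.length : Int) < n then
        trimALoop n rest (lis ++ temp_lis ++ [['.']]) (num + (temp_lis.length : Int))
      else lis

def trim_text_to_n_words (text : String) (n : Int) : String :=
  String.ofList (PySem.Chars.join [' ']
    (trimALoop n (PySem.Chars.splitOn text.toList ['.']) [] 0))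

-- ===== PORT B =====
-- Source B's cum list: running totals of per-sentence word counts.
def trimBCum (sentences : List (List Char)) : List Int :=
  (sentences.foldl
    (fun (p : List Int × Int) s =>
      let total := p.2 + ((PySem.Chars.splitOn s [' ']).length : Int)
      (p.1 ++ [total], total)) ([], 0)).1

def trim_text_to_n_words_alt (text : String) (n : Int) : String :=
  let sentences := PySem.Chars.splitOn text.toList ['.']
  let cum := trimBCum sentences
  let k := (cum.filter (fun t => decide (t < n))).length
  let kept := sentences.take k
  if kept.isEmpty then ""
  else String.ofList (PySem.Chars.join [' ', '.', ' '] kept ++ [' ', '.'])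

-- ===== PRECONDITION & SPEC =====
def Spec_trim_text_to_n_words (text : String) (n : Int) (out : String) : Prop := out = trim_text_to_n_words_alt text n
instance (text : String) (n : Int) (out : String) : Decidable (Spec_trim_text_to_n_words text n out) := by unfold Spec_trim_text_to_n_words; infer_instance

-- ===== CLAIM (what is proved, stated in full; the proofs are below) =====
def Claim_equal_trim_text_to_n_words : Prop := ∀ (text : String) (n : Int), Dom_trim_text_to_n_words text n → Spec_trim_text_to_n_words text n (trim_text_to_n_words text n)

-- ===== LEMMAS AND PROOFS =====

-- PySem's fueled single-character split is List.splitOn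
theorem pv_splitOnP_ne_nil (p : Char → Bool) (l : List Char) : List.splitOnP p l ≠ [] := by
  induction l with
  | nil => simp [List.splitOnP_nil]
  | cons a t ih =>
      rw [List.splitOnP_cons]
      split_ifs
      · simp
      · cases h : List.splitOnP p t with
        | nil => exact absurd h ih
        | cons x xs => simp [List.modifyHead]

theorem pv_go_single (c : Char) : ∀ (fuel : Nat) (l cur : List Char) (acc : List (List Char)),
    l.length < fuel →
    PySem.Chars.splitOn.go [c] fuel l cur acc
      = acc.reverse ++ (List.splitOn c l).modifyHead (fun x => cur.reverse ++ x) := by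
  intro fuel
  induction fuel with
  | zero => intro l cur acc h; omega
  | succ fuel ih =>
      intro l cur acc h
      cases l with
      | nil =>
          simp [PySem.Chars.splitOn.go, List.splitOn_nil, List.modifyHead]
      | cons a rest =>
          by_cases hca : c = a
          · subst hca
            have hpre : List.isPrefixOf [c] (c :: rest) = true := by
              simp [List.isPrefixOf]
            simp only [PySem.Chars.splitOn.go, hpre, if_true, List.length_cons, List.length_nil,
              List.drop_succ_cons, List.drop_zero]
            rw [ih rest [] (List.reverse cur :: acc) (by simpa using Nat.lt_of_succ_lt_succ h)]
            have hs : List.splitOn c (c :: rest) = [] :: List.splitOn c rest := by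
              show List.splitOnP (· == c) (c :: rest) = [] :: List.splitOnP (· == c) rest
              rw [List.splitOnP_cons]; simp
            rw [hs]
            cases hrest : List.splitOn c rest with
            | nil => simp [List.modifyHead]
            | cons x xs => simp [List.modifyHead]
          · have hpre : List.isPrefixOf [c] (a :: rest) = false := by
              simp only [List.isPrefixOf, Bool.and_true,
                beq_eq_false_iff_ne, ne_eq]
              exact hca
            simp only [PySem.Chars.splitOn.go, hpre, Bool.false_eq_true, if_false]
            rw [ih rest (a :: cur) acc (by simpa using Nat.lt_of_succ_lt_succ h)]
            have hs : List.splitOn c (a :: rest)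
                = (List.splitOn c rest).modifyHead (fun x => a :: x) := by
              show List.splitOnP (· == c) (a :: rest)
                = (List.splitOnP (· == c) rest).modifyHead (fun x => a :: x)
              rw [List.splitOnP_cons]
              have : (a == c) = false := by
                simp; intro hc; exact absurd hc.symm hca
              simp [this, List.modifyHead]
            rw [hs]
            cases hrest : List.splitOn c rest with
            | nil => simp [List.modifyHead]
            | cons x xs => simp [List.modifyHead]

theorem pv_splitOn_eq (c : Char) (cs : List Char) :
    PySem.Chars.splitOn cs [c] = List.splitOn c cs := by
  unfold PySem.Chars.splitOn
  rw [pv_go_single c (cs.length + 1) cs [] [] (by omega)]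
  cases h : List.splitOn c cs with
  | nil => simp [List.modifyHead]
  | cons x xs => simp [List.modifyHead]

theorem pv_splitOn_ne_nil (c : Char) (cs : List Char) : PySem.Chars.splitOn cs [c] ≠ [] := by
  rw [pv_splitOn_eq]
  exact pv_splitOnP_ne_nil (· == c) cs

theorem pv_join_splitOn (c : Char) (cs : List Char) :
    PySem.Chars.join [c] (PySem.Chars.splitOn cs [c]) = cs := by
  rw [pv_splitOn_eq]
  show List.intercalate [c] (List.splitOn c cs) = cs
  exact List.intercalate_splitOn cs c

theorem pv_join_append (sep : List Char) : ∀ (xs ys : List (List Char)), xs ≠ [] → ys ≠ [] →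
    PySem.Chars.join sep (xs ++ ys)
      = PySem.Chars.join sep xs ++ sep ++ PySem.Chars.join sep ys := by
  intro xs
  induction xs with
  | nil => intro ys h _; exact absurd rfl h
  | cons x xs ih =>
      intro ys _ hys
      cases xs with
      | nil =>
          cases ys with
          | nil => exact absurd rfl hys
          | cons y ys' =>
              show PySem.Chars.join sep (x :: y :: ys') = _
              rw [PySem.Chars.join_cons_cons, PySem.Chars.join_singleton]
      | cons x' xs' =>
          have hih := ih ys (by simp) hys
          simp only [List.cons_append] at hih ⊢
          rw [PySem.Chars.join_cons_cons, hih, PySem.Chars.join_cons_cons]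
          simp [List.append_assoc]

-- word count of a sentence, as A and B both compute it
def pvW (s : List Char) : Int := ((PySem.Chars.splitOn s [' ']).length : Int)

-- the prefix of sentences A keeps (its break condition), with running word count
def pvKept (n : Int) : List (List Char) → Int → List (List Char)
  | [], _ => []
  | s :: rest, num => if num + pvW s < n then s :: pvKept n rest (num + pvW s) else []

-- B's cumulative sums from a given start
def pvCum : List (List Char) → Int → List Int
  | [], _ => []
  | s :: rest, t => (t + pvW s) :: pvCum rest (t + pvW s)

theorem pv_loopA (n : Int) : ∀ (ss lis : List (List Char)) (num : Int),
    trimALoop n ss lis num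
      = lis ++ (pvKept n ss num).flatMap (fun s => PySem.Chars.splitOn s [' '] ++ [['.']]) := by
  intro ss
  induction ss with
  | nil => intro lis num; simp [trimALoop, pvKept]
  | cons s rest ih =>
      intro lis num
      by_cases hc : num + pvW s < n
      · simp only [trimALoop, pvKept, pvW] at *
        rw [if_pos hc, if_pos hc, ih]
        simp [List.append_assoc]
      · simp only [trimALoop, pvKept, pvW] at *
        rw [if_neg hc, if_neg hc]
        simp

theorem pv_cum_fold : ∀ (ss : List (List Char)) (acc : List Int) (t : Int),
    (ss.foldl
      (fun (p : List Int × Int) s =>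
        let total := p.2 + ((PySem.Chars.splitOn s [' ']).length : Int)
        (p.1 ++ [total], total)) (acc, t)).1 = acc ++ pvCum ss t := by
  intro ss
  induction ss with
  | nil => intro acc t; simp [pvCum]
  | cons s rest ih =>
      intro acc t
      simp only [List.foldl_cons, pvCum, pvW]
      rw [ih]
      simp

theorem pv_cum_lb : ∀ (ss : List (List Char)) (t x : Int), x ∈ pvCum ss t → t ≤ x := by
  intro ss
  induction ss with
  | nil => intro t x h; simp [pvCum] at h
  | cons s rest ih =>
      intro t x h
      have hw : 0 ≤ pvW s := Int.natCast_nonneg _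
      simp only [pvCum, List.mem_cons] at h
      rcases h with h | h
      · omega
      · have := ih (t + pvW s) x h; omega

theorem pv_count (n : Int) : ∀ (ss : List (List Char)) (t : Int),
    ((pvCum ss t).filter (fun x => decide (x < n))).length = (pvKept n ss t).length := by
  intro ss
  induction ss with
  | nil => intro t; simp [pvCum, pvKept]
  | cons s rest ih =>
      intro t
      by_cases hc : t + pvW s < n
      · simp only [pvCum, pvKept, List.filter_cons]
        rw [if_pos hc]
        simp [ih, hc]
      · simp only [pvCum, pvKept]
        rw [if_neg hc]
        have hnil : (((t + pvW s) :: pvCum rest (t + pvW s)).filter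
            (fun x => decide (x < n))) = [] := by
          rw [List.filter_eq_nil_iff]
          intro x hx
          simp only [List.mem_cons] at hx
          rcases hx with hx | hx
          · simp; omega
          · have := pv_cum_lb rest (t + pvW s) x hx
            simp; omega
        rw [hnil]
        simp

theorem pv_kept_take (n : Int) : ∀ (ss : List (List Char)) (t : Int),
    ss.take (pvKept n ss t).length = pvKept n ss t := by
  intro ss
  induction ss with
  | nil => intro t; simp [pvKept]
  | cons s rest ih =>
      intro t
      by_cases hc : t + pvW s < n
      · simp only [pvKept]
        rw [if_pos hc]
        simp [ih]
      · simp only [pvKept]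
        rw [if_neg hc]
        simp

theorem pv_join_flat : ∀ (ks : List (List Char)), ks ≠ [] →
    PySem.Chars.join [' '] (ks.flatMap (fun s => PySem.Chars.splitOn s [' '] ++ [['.']]))
      = PySem.Chars.join [' ', '.', ' '] ks ++ [' ', '.'] := by
  intro ks
  induction ks with
  | nil => intro h; exact absurd rfl h
  | cons s rest ih =>
      intro _
      cases rest with
      | nil =>
          simp only [List.flatMap_cons, List.flatMap_nil, List.append_nil]
          rw [pv_join_append [' '] _ [['.']] (pv_splitOn_ne_nil ' ' s) (by simp),
            pv_join_splitOn, PySem.Chars.join_singleton, PySem.Chars.join_singleton]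
          simp
      | cons r rs =>
          simp only [List.flatMap_cons]
          have hA : PySem.Chars.splitOn s [' '] ++ [['.']] ≠ [] := by
            intro h; simp [List.append_eq_nil_iff] at h
          have hB : PySem.Chars.splitOn r [' '] ++ [['.']]
              ++ List.flatMap (fun s => PySem.Chars.splitOn s [' '] ++ [['.']]) rs ≠ [] := by
            intro h; simp [List.append_eq_nil_iff] at h
          rw [pv_join_append [' '] _ _ hA hB]
          rw [pv_join_append [' '] _ [['.']] (pv_splitOn_ne_nil ' ' s) (by simp),
            pv_join_splitOn, PySem.Chars.join_singleton]
          have hih := ih (by simp)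
          simp only [List.flatMap_cons] at hih
          rw [hih, PySem.Chars.join_cons_cons]
          simp [List.append_assoc]

-- ===== VERDICT (by name: the statement is the Claim_ definition above) =====
theorem trim_text_to_n_words_spec : Claim_equal_trim_text_to_n_words := by
  intro text n _hdom
  unfold Spec_trim_text_to_n_words trim_text_to_n_words trim_text_to_n_words_alt
  rw [pv_loopA]
  have hcum : trimBCum (PySem.Chars.splitOn text.toList ['.'])
      = pvCum (PySem.Chars.splitOn text.toList ['.']) 0 := by
    unfold trimBCum
    rw [pv_cum_fold]
    simp
  simp only [hcum, pv_count, pv_kept_take, List.nil_append]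
  cases hK : pvKept n (PySem.Chars.splitOn text.toList ['.']) 0 with
  | nil => simp [PySem.Chars.join_nil]
  | cons k ks =>
      rw [pv_join_flat (k :: ks) (by simp)]
      simp
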